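-- pv_equiv track=rewrite | github.com/estructuras-y-programacion-itba/practica-0-fbordalamensa | main.py | calcular_puntaje_categoria
-- ===== SOURCE A (Python) =====
-- def calcular_puntaje_categoria(lista_dados, cat_elegida, planto_primera_tirada):
--     dados = sorted(lista_dados)
--     puntaje = 0
--     entra = False
--
--     if cat_elegida == 'E':
--         if dados == [1, 2, 3, 4, 5] or dados == [2, 3, 4, 5, 6]:
--             puntaje = 20
--             if planto_primera_tirada:
--                 puntaje += 5
--             entra = True
--
--     elif cat_elegida == 'F':
--         if ((dados[0] == dados[1] == dados[2] and dados[3] == dados[4]) or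
--             (dados[0] == dados[1] and dados[2] == dados[3] == dados[4])):
--             puntaje = 30
--             if planto_primera_tirada:
--                 puntaje += 5
--             entra = True
--
--     elif cat_elegida == 'P':
--         if (dados[0] == dados[1] == dados[2] == dados[3] or
--             dados[1] == dados[2] == dados[3] == dados[4]):
--             puntaje = 40
--             if planto_primera_tirada:
--                 puntaje += 5
--             entra = True
--
--     elif cat_elegida == 'G':
--         if dados[0] == dados[1] == dados[2] == dados[3] == dados[4]:
--             puntaje = 50
--             entra = True
--
--     elif cat_elegida == '1':
--         for elem in dados:
--             if elem == 1:
--                 puntaje += 1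
--         if puntaje > 0:
--             entra = True
--
--     elif cat_elegida == '2':
--         for elem in dados:
--             if elem == 2:
--                 puntaje += 2
--         if puntaje > 0:
--             entra = True
--
--     elif cat_elegida == '3':
--         for elem in dados:
--             if elem == 3:
--                 puntaje += 3
--         if puntaje > 0:
--             entra = True
--
--     elif cat_elegida == '4':
--         for elem in dados:
--             if elem == 4:
--                 puntaje += 4
--         if puntaje > 0:
--             entra = True
--
--     elif cat_elegida == '5':
--         for elem in dados:
--             if elem == 5:
--                 puntaje += 5
--         if puntaje > 0:
--             entra = True
--
--     elif cat_elegida == '6':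
--         for elem in dados:
--             if elem == 6:
--                 puntaje += 6
--         if puntaje > 0:
--             entra = True
--
--     return puntaje, entra
-- ===== SOURCE B (Python) =====
-- def calcular_puntaje_categoria(lista_dados, cat_elegida, planto_primera_tirada):
--     s = sorted(lista_dados)
--     # run-length encode the sorted dice: one (value, count) per distinct value
--     runs = []
--     for d in s:
--         if runs and runs[-1][0] == d:
--             runs[-1][1] += 1
--         else:
--             runs.append([d, 1])
--     patron = sorted(c for _, c in runs)
--     bonus = 5 if planto_primera_tirada else 0
--     if cat_elegida == 'E':
--         if s == [1, 2, 3, 4, 5] or s == [2, 3, 4, 5, 6]: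
--             return 20 + bonus, True
--     elif cat_elegida == 'F':
--         if patron == [2, 3] or patron == [5]:
--             return 30 + bonus, True
--     elif cat_elegida == 'P':
--         if patron and patron[-1] >= 4:
--             return 40 + bonus, True
--     elif cat_elegida == 'G':
--         if patron == [5]:
--             return 50, True
--     elif cat_elegida in ('1', '2', '3', '4', '5', '6'):
--         v = int(cat_elegida)
--         c = lista_dados.count(v)
--         return c * v, c > 0
--     return 0, False
-- ===== Notes on version B (the rewrite author's own statement) =====
-- stated objective: simpler
-- what changed: B replaces A's sorted-index equality chains by a run-length encoding of the sorted dice and dispatches F/P/G on the sorted count pattern ([2,3]/[5], max count >= 4, [5]); the six digit categories collapse into one branch computing count(v)*v instead of six copy-pasted accumulation loops.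
-- outside the precondition, e.g. on calcular_puntaje_categoria([2, 2, 2, 3, 3, 9], 'F', False): A returns (30, True), B returns (0, False); on calcular_puntaje_categoria([1, 1, 1, 1, 1, 2], 'G', False): A returns (50, True), B returns (0, False); on calcular_puntaje_categoria([1, 1, 1], 'P', False): A raises IndexError, B returns (0, False)
import Mathlib
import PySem

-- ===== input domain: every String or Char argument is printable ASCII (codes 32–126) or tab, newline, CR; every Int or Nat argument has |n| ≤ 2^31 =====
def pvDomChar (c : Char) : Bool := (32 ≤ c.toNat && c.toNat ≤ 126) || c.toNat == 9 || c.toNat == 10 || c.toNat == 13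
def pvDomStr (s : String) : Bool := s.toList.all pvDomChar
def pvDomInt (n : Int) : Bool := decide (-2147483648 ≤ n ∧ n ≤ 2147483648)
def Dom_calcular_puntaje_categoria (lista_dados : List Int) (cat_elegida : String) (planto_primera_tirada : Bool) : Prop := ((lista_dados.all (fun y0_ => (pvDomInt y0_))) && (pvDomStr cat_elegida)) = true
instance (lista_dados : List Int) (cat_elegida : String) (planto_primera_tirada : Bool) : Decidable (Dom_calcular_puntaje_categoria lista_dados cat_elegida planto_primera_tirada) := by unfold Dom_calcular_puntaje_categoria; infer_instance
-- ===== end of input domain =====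

-- B replaces A's sorted-index equality chains by a run-length pattern dispatch (simpler, not faster).

-- ===== PORT A =====
-- 'puntaje += v for elem == v' loop of the digit categories, as a fold
def pvDigitLoopA (dados : List Int) (v : Int) : Int :=
  dados.foldl (fun acc elem => if elem = v then acc + v else acc) 0

def calcular_puntaje_categoria (lista_dados : List Int) (cat_elegida : String) (planto_primera_tirada : Bool) : Int × Bool :=
  let dados := PySem.List.sorted lista_dados (fun x => x) false
  if cat_elegida == "E" then
    if dados = [1, 2, 3, 4, 5] ∨ dados = [2, 3, 4, 5, 6] then
      ((if planto_primera_tirada then (20 : Int) + 5 else 20), true)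
    else (0, false)
  else if cat_elegida == "F" then
    -- dados[0] … dados[4]; 'none' is Python's IndexError, excluded by Pre_
    match PySem.List.pyGet? dados 0, PySem.List.pyGet? dados 1, PySem.List.pyGet? dados 2,
          PySem.List.pyGet? dados 3, PySem.List.pyGet? dados 4 with
    | some d0, some d1, some d2, some d3, some d4 =>
      if (d0 = d1 ∧ d1 = d2 ∧ d3 = d4) ∨ (d0 = d1 ∧ d2 = d3 ∧ d3 = d4) then
        ((if planto_primera_tirada then (30 : Int) + 5 else 30), true)
      else (0, false)
    | _, _, _, _, _ => (0, false)
  else if cat_elegida == "P" then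
    match PySem.List.pyGet? dados 0, PySem.List.pyGet? dados 1, PySem.List.pyGet? dados 2,
          PySem.List.pyGet? dados 3, PySem.List.pyGet? dados 4 with
    | some d0, some d1, some d2, some d3, some d4 =>
      if (d0 = d1 ∧ d1 = d2 ∧ d2 = d3) ∨ (d1 = d2 ∧ d2 = d3 ∧ d3 = d4) then
        ((if planto_primera_tirada then (40 : Int) + 5 else 40), true)
      else (0, false)
    | _, _, _, _, _ => (0, false)
  else if cat_elegida == "G" then
    match PySem.List.pyGet? dados 0, PySem.List.pyGet? dados 1, PySem.List.pyGet? dados 2,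
          PySem.List.pyGet? dados 3, PySem.List.pyGet? dados 4 with
    | some d0, some d1, some d2, some d3, some d4 =>
      if d0 = d1 ∧ d1 = d2 ∧ d2 = d3 ∧ d3 = d4 then ((50 : Int), true) else (0, false)
    | _, _, _, _, _ => (0, false)
  else if cat_elegida == "1" then
    let puntaje := pvDigitLoopA dados 1; (puntaje, decide (puntaje > 0))
  else if cat_elegida == "2" then
    let puntaje := pvDigitLoopA dados 2; (puntaje, decide (puntaje > 0))
  else if cat_elegida == "3" then
    let puntaje := pvDigitLoopA dados 3; (puntaje, decide (puntaje > 0))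
  else if cat_elegida == "4" then
    let puntaje := pvDigitLoopA dados 4; (puntaje, decide (puntaje > 0))
  else if cat_elegida == "5" then
    let puntaje := pvDigitLoopA dados 5; (puntaje, decide (puntaje > 0))
  else if cat_elegida == "6" then
    let puntaje := pvDigitLoopA dados 6; (puntaje, decide (puntaje > 0))
  else (0, false)

-- ===== PORT B =====
-- run-length encoding of the sorted dice (Source B's 'runs' loop, one (value, count) per run)
def pvRuns (s : List Int) : List (Int × Int) :=
  s.foldl (fun runs d =>
    match runs.getLast? with
    | some (v, c) => if v = d then runs.dropLast ++ [(v, c + 1)] else runs ++ [(d, 1)]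
    | none => [(d, 1)]) []

def calcular_puntaje_categoria_alt (lista_dados : List Int) (cat_elegida : String) (planto_primera_tirada : Bool) : Int × Bool :=
  let s := PySem.List.sorted lista_dados (fun x => x) false
  let runs := pvRuns s
  let patron := PySem.List.sorted (runs.map (fun r => r.2)) (fun x => x) false
  let bonus : Int := if planto_primera_tirada then 5 else 0
  if cat_elegida == "E" then
    if s = [1, 2, 3, 4, 5] ∨ s = [2, 3, 4, 5, 6] then (20 + bonus, true) else (0, false)
  else if cat_elegida == "F" then
    if patron = [2, 3] ∨ patron = [5] then (30 + bonus, true) else (0, false)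
  else if cat_elegida == "P" then
    match patron.getLast? with           -- 'patron and patron[-1] >= 4'
    | some m => if m ≥ 4 then (40 + bonus, true) else (0, false)
    | none => (0, false)
  else if cat_elegida == "G" then
    if patron = [5] then (50, true) else (0, false)
  else if cat_elegida ∈ ["1", "2", "3", "4", "5", "6"] then
    match PySem.Int.ofStr? cat_elegida with   -- int(cat_elegida); always succeeds on these six strings
    | some v => let c := lista_dados.count v; ((c : Int) * v, decide (c > 0))
    | none => (0, false)
  else (0, false)

-- ===== PRECONDITION & SPEC =====
-- Pre_ requires exactly five dice for categories F/P/G (the game's hand size): with fewer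
-- dice A raises IndexError, and a hand of more than five dice is outside the game's domain
-- (there A's index tests read only the first five sorted dice).
def Pre_calcular_puntaje_categoria (lista_dados : List Int) (cat_elegida : String) (planto_primera_tirada : Bool) : Prop :=
  (cat_elegida = "F" ∨ cat_elegida = "P" ∨ cat_elegida = "G") → lista_dados.length = 5
instance (lista_dados : List Int) (cat_elegida : String) (planto_primera_tirada : Bool) : Decidable (Pre_calcular_puntaje_categoria lista_dados cat_elegida planto_primera_tirada) := by unfold Pre_calcular_puntaje_categoria; infer_instance

def pvWitness_calcular_puntaje_categoria : List Int × String × Bool := ([2, 2, 5, 2, 2], "P", true)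

def Spec_calcular_puntaje_categoria (lista_dados : List Int) (cat_elegida : String) (planto_primera_tirada : Bool) (out : Int × Bool) : Prop := out = calcular_puntaje_categoria_alt lista_dados cat_elegida planto_primera_tirada
instance (lista_dados : List Int) (cat_elegida : String) (planto_primera_tirada : Bool) (out : Int × Bool) : Decidable (Spec_calcular_puntaje_categoria lista_dados cat_elegida planto_primera_tirada out) := by unfold Spec_calcular_puntaje_categoria; infer_instance

-- ===== CLAIM (what is proved, stated in full; the proofs are below) =====
def Claim_equal_calcular_puntaje_categoria : Prop := ∀ (lista_dados : List Int) (cat_elegida : String) (planto_primera_tirada : Bool), Dom_calcular_puntaje_categoria lista_dados cat_elegida planto_primera_tirada → Pre_calcular_puntaje_categoria lista_dados cat_elegida planto_primera_tirada → Spec_calcular_puntaje_categoria lista_dados cat_elegida planto_primera_tirada (calcular_puntaje_categoria lista_dados cat_elegida planto_primera_tirada)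

-- ===== LEMMAS AND PROOFS =====

-- holds for every accumulator value; used by pvDigitLoopA_eq_count
theorem pvDigitLoopA_gen (l : List Int) (v a : Int) :
    l.foldl (fun acc elem => if elem = v then acc + v else acc) a = a + (l.count v : Int) * v := by
  induction l generalizing a with
  | nil => simp
  | cons x t ih =>
    by_cases h : x = v <;> simp [h, ih]
    ring

-- A's digit loop over any list is the die value times the count of that value
theorem pvDigitLoopA_eq_count (l : List Int) (v : Int) :
    pvDigitLoopA l v = (l.count v : Int) * v := by
  simpa using pvDigitLoopA_gen l v 0

-- a list of length 5 is a 5-element literal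
theorem pvLen5 {A : Type} (xs : List A) (h : xs.length = 5) : ∃ a b c d e, xs = [a, b, c, d, e] := by
  rcases xs with _|⟨a,_|⟨b,_|⟨c,_|⟨d,_|⟨e,_|⟨f,t⟩⟩⟩⟩⟩⟩ <;> simp at h
  exact ⟨a, b, c, d, e, rfl⟩

-- counting over the sorted list is counting over the original list
theorem pvCount_sorted (l : List Int) (v : Int) :
    (PySem.List.sorted l (fun x => x) false).count v = l.count v :=
  (PySem.List.sorted_perm l (fun x => x) false).count_eq v

-- ===== VERDICT (by name: the statement is the Claim_ definition above) =====
set_option maxHeartbeats 4000000 in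
theorem calcular_puntaje_categoria_spec : Claim_equal_calcular_puntaje_categoria := by
  intro l cat p _ hpre
  unfold Spec_calcular_puntaje_categoria
  by_cases hE : cat = "E"
  · subst hE
    cases p <;> simp [calcular_puntaje_categoria, calcular_puntaje_categoria_alt]
  by_cases hF : cat = "F"
  · subst hF
    obtain ⟨a, b, c, d, e, hsl⟩ :=
      pvLen5 (PySem.List.sorted l (fun x => x) false)
        (by rw [PySem.List.length_sorted]; exact hpre (Or.inl rfl))
    simp only [calcular_puntaje_categoria, calcular_puntaje_categoria_alt, hsl]
    simp only [pysem]
    by_cases hab : a = b <;> by_cases hbc : b = c <;> by_cases hcd : c = d <;> by_cases hde : d = e <;>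
      subst_vars <;> cases p <;> simp_all [pvRuns] <;> decide
  by_cases hP : cat = "P"
  · subst hP
    obtain ⟨a, b, c, d, e, hsl⟩ :=
      pvLen5 (PySem.List.sorted l (fun x => x) false)
        (by rw [PySem.List.length_sorted]; exact hpre (Or.inr (Or.inl rfl)))
    simp only [calcular_puntaje_categoria, calcular_puntaje_categoria_alt, hsl]
    simp only [pysem]
    by_cases hab : a = b <;> by_cases hbc : b = c <;> by_cases hcd : c = d <;> by_cases hde : d = e <;>
      subst_vars <;> cases p <;> simp_all [pvRuns] <;> decide
  by_cases hG : cat = "G"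
  · subst hG
    obtain ⟨a, b, c, d, e, hsl⟩ :=
      pvLen5 (PySem.List.sorted l (fun x => x) false)
        (by rw [PySem.List.length_sorted]; exact hpre (Or.inr (Or.inr rfl)))
    simp only [calcular_puntaje_categoria, calcular_puntaje_categoria_alt, hsl]
    simp only [pysem]
    by_cases hab : a = b <;> by_cases hbc : b = c <;> by_cases hcd : c = d <;> by_cases hde : d = e <;>
      subst_vars <;> cases p <;> simp_all [pvRuns] <;> decide
  by_cases h1 : cat = "1"
  · subst h1
    simp [calcular_puntaje_categoria, calcular_puntaje_categoria_alt,
          pvDigitLoopA_eq_count, pvCount_sorted, PySem.Int.ofStr?,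
          show PySem.Int.ofChars? ['1'] = some 1 from by decide]
  by_cases h2 : cat = "2"
  · subst h2
    simp [calcular_puntaje_categoria, calcular_puntaje_categoria_alt,
          pvDigitLoopA_eq_count, pvCount_sorted, PySem.Int.ofStr?,
          show PySem.Int.ofChars? ['2'] = some 2 from by decide]
  by_cases h3 : cat = "3"
  · subst h3
    simp [calcular_puntaje_categoria, calcular_puntaje_categoria_alt,
          pvDigitLoopA_eq_count, pvCount_sorted, PySem.Int.ofStr?,
          show PySem.Int.ofChars? ['3'] = some 3 from by decide]
  by_cases h4 : cat = "4"
  · subst h4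
    simp [calcular_puntaje_categoria, calcular_puntaje_categoria_alt,
          pvDigitLoopA_eq_count, pvCount_sorted, PySem.Int.ofStr?,
          show PySem.Int.ofChars? ['4'] = some 4 from by decide]
  by_cases h5 : cat = "5"
  · subst h5
    simp [calcular_puntaje_categoria, calcular_puntaje_categoria_alt,
          pvDigitLoopA_eq_count, pvCount_sorted, PySem.Int.ofStr?,
          show PySem.Int.ofChars? ['5'] = some 5 from by decide]
  by_cases h6 : cat = "6"
  · subst h6
    simp [calcular_puntaje_categoria, calcular_puntaje_categoria_alt,
          pvDigitLoopA_eq_count, pvCount_sorted, PySem.Int.ofStr?,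
          show PySem.Int.ofChars? ['6'] = some 6 from by decide]
  · simp [calcular_puntaje_categoria, calcular_puntaje_categoria_alt,
          hE, hF, hP, hG, h1, h2, h3, h4, h5, h6]
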